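-- pv_equiv track=rewrite | github.com/diwash-sresta/python_training | Challenges/counting_fuel_cells.py | count_and_sum_fuel_cells
-- ===== SOURCE A (Python) =====
-- def count_and_sum_fuel_cells(energy_lvl,threshold):
--     count = 0
--     total_energy = 0
--     for energy in energy_lvl:
--         if energy > threshold:
--             count += 1
--             total_energy += energy
--
--     return count,total_energy
-- ===== SOURCE B (Python) =====
-- def count_and_sum_fuel_cells(energy_lvl, threshold):
--     # Sort, binary-search the first element > threshold, take the suffix.
--     s = sorted(energy_lvl)
--     lo, hi = 0, len(s)
--     while lo < hi:
--         mid = (lo + hi) // 2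
--         if s[mid] > threshold:
--             hi = mid
--         else:
--             lo = mid + 1
--     hot = s[lo:]
--     return len(hot), sum(hot)
-- ===== Notes on version B (the rewrite author's own statement) =====
-- stated objective: alternative
-- what changed: Instead of one fused accumulation pass, B sorts the list, binary-searches the first index whose element exceeds the threshold, and returns the length and sum of the suffix from that index; correct because after sorting the elements above the threshold are exactly that suffix and count/sum are permutation-invariant.
import Mathlib
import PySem

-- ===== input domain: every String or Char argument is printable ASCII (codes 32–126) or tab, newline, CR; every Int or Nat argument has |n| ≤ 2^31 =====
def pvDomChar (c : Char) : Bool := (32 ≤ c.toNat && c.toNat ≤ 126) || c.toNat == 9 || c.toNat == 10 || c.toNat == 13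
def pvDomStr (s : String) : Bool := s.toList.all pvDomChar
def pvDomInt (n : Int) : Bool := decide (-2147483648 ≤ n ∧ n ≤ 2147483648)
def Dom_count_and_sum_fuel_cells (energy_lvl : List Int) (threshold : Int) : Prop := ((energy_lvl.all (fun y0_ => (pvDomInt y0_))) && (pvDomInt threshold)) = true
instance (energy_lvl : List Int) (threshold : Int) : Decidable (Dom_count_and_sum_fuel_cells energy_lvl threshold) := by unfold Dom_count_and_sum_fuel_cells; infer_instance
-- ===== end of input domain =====

-- B replaces A's fused accumulation pass by sort + binary search for the first element
-- above the threshold + length/sum of the suffix from there (alternative algorithm, not faster).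

-- ===== PORT A =====
def count_and_sum_fuel_cells (energy_lvl : List Int) (threshold : Int) : Int × Int :=
  energy_lvl.foldl
    (fun st energy =>
      if energy > threshold then (st.1 + 1, st.2 + energy) else st)
    (0, 0)

-- ===== PORT B =====
-- the 'while lo < hi' binary-search loop of Source B; fuel = len(s) bounds its iterations
-- (hi - lo shrinks by at least 1 each round), so fuel is only a totality guard.
-- s[mid] is always in range (0 ≤ lo ≤ mid < hi ≤ len), so '.getD 0' never supplies the default.
def pvBisect (s : List Int) (threshold : Int) : Nat → Int → Int → Int
  | 0, lo, _ => lo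
  | fuel + 1, lo, hi =>
    if lo < hi then
      let mid := PySem.Int.floordiv (lo + hi) 2
      if (PySem.List.pyGet? s mid).getD 0 > threshold then
        pvBisect s threshold fuel lo mid
      else
        pvBisect s threshold fuel (mid + 1) hi
    else lo

def count_and_sum_fuel_cells_alt (energy_lvl : List Int) (threshold : Int) : Int × Int :=
  let s := PySem.List.sorted energy_lvl (fun x => x) false
  let lo := pvBisect s threshold s.length 0 (s.length : Int)
  let hot := PySem.List.slice s (some lo) none
  ((hot.length : Int), hot.sum)

-- ===== PRECONDITION & SPEC =====
def Spec_count_and_sum_fuel_cells (energy_lvl : List Int) (threshold : Int) (out : Int × Int) : Prop := out = count_and_sum_fuel_cells_alt energy_lvl threshold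
instance (energy_lvl : List Int) (threshold : Int) (out : Int × Int) : Decidable (Spec_count_and_sum_fuel_cells energy_lvl threshold out) := by unfold Spec_count_and_sum_fuel_cells; infer_instance

-- ===== CLAIM (what is proved, stated in full; the proofs are below) =====
def Claim_equal_count_and_sum_fuel_cells : Prop := ∀ (energy_lvl : List Int) (threshold : Int), Dom_count_and_sum_fuel_cells energy_lvl threshold → Spec_count_and_sum_fuel_cells energy_lvl threshold (count_and_sum_fuel_cells energy_lvl threshold)

-- ===== LEMMAS AND PROOFS =====

-- A's fold computes the length and sum of the filtered list.
theorem fold_filter (energy_lvl : List Int) (threshold : Int) (c t : Int) :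
    energy_lvl.foldl
      (fun st energy => if energy > threshold then (st.1 + 1, st.2 + energy) else st)
      (c, t)
    = (c + ((energy_lvl.filter (fun e => e > threshold)).length : Int),
       t + (energy_lvl.filter (fun e => e > threshold)).sum) := by
  induction energy_lvl generalizing c t with
  | nil => simp
  | cons x xs ih =>
    simp only [List.foldl_cons, List.filter_cons]
    by_cases h : x > threshold
    · simp [h, ih]; constructor <;> ring
    · simp [h, ih]

-- Binary-search invariant: on a ≤-sorted list, pvBisect returns an index r with
-- everything before r ≤ threshold and everything from r on > threshold.
theorem pvBisect_spec (s : List Int) (t : Int) (hs : s.Pairwise (· ≤ ·)) :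
    ∀ (fuel : Nat) (lo hi : Int), 0 ≤ lo → lo ≤ hi → hi ≤ (s.length : Int) →
      (hi - lo).toNat ≤ fuel →
      (∀ (i : Nat) (h : i < s.length), i < lo.toNat → s[i] ≤ t) →
      (∀ (i : Nat) (h : i < s.length), hi.toNat ≤ i → t < s[i]) →
      0 ≤ pvBisect s t fuel lo hi ∧ pvBisect s t fuel lo hi ≤ (s.length : Int) ∧
      (∀ (i : Nat) (h : i < s.length), i < (pvBisect s t fuel lo hi).toNat → s[i] ≤ t) ∧
      (∀ (i : Nat) (h : i < s.length), (pvBisect s t fuel lo hi).toNat ≤ i → t < s[i]) := by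
  have hmono : ∀ (i j : Nat) (hi : i < s.length) (hj : j < s.length), i ≤ j → s[i] ≤ s[j] := by
    intro i j hi hj hij
    rcases Nat.lt_or_ge i j with h | h
    · exact (List.pairwise_iff_getElem.mp hs) i j hi hj h
    · have : i = j := by omega
      subst this; rfl
  intro fuel
  induction fuel with
  | zero =>
    intro lo hi h0 hlh hhl hf hlo hhi
    simp only [pvBisect]
    have : hi = lo := by omega
    subst this
    exact ⟨h0, by omega, hlo, fun i h hle => hhi i h hle⟩
  | succ f ih =>
    intro lo hi h0 hlh hhl hf hlo hhi
    simp only [pvBisect]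
    by_cases hlt : lo < hi
    · simp only [if_pos hlt]
      have hmb := PySem.Int.floordiv_two_mid_bounds (le_of_lt hlt)
      set mid := PySem.Int.floordiv (lo + hi) 2 with hmid
      have hmlt : mid < hi := by
        rw [hmid, PySem.Int.floordiv_lt_iff_lt_mul (by omega : (0:Int) < 2)]
        omega
      have hmrange : mid.toNat < s.length := by omega
      have hget : (PySem.List.pyGet? s mid).getD 0 = s[mid.toNat] := by
        rw [PySem.List.pyGet?_of_nonneg s (by omega : (0:Int) ≤ mid),
          List.getElem?_eq_getElem hmrange]
        rfl
      rw [hget]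
      by_cases hc : s[mid.toNat] > t
      · simp only [if_pos hc]
        exact ih lo mid h0 hmb.1 (by omega) (by omega) hlo
          (fun i h hge => lt_of_lt_of_le hc (hmono mid.toNat i hmrange h hge))
      · simp only [if_neg hc]
        exact ih (mid + 1) hi (by omega) (by omega) hhl (by omega)
          (fun i h hlt' => le_trans (hmono i mid.toNat h hmrange (by omega)) (by omega))
          hhi
    · simp only [if_neg hlt]
      have : hi = lo := by omega
      subst this
      exact ⟨h0, by omega, hlo, fun i h hle => hhi i h hle⟩

-- On a sorted list split cleanly by the threshold at index r, the filter is the suffix.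
theorem filter_eq_drop (s : List Int) (t : Int) (n : Nat)
    (hle : ∀ (i : Nat) (h : i < s.length), i < n → s[i] ≤ t)
    (hgt : ∀ (i : Nat) (h : i < s.length), n ≤ i → t < s[i]) :
    s.filter (fun e => e > t) = s.drop n := by
  conv_lhs => rw [← List.take_append_drop n s]
  rw [List.filter_append]
  have h1 : (s.take n).filter (fun e => e > t) = [] := by
    rw [List.filter_eq_nil_iff]
    intro a ha
    obtain ⟨i, hi, rfl⟩ := List.mem_iff_getElem.mp ha
    have hilen : i < s.length := by
      have := hi; simp [List.length_take] at this; omega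
    have hin : i < n := by
      have := hi; simp [List.length_take] at this; omega
    have : (s.take n)[i] = s[i] := List.getElem_take
    rw [this]
    simpa using hle i hilen hin
  have h2 : (s.drop n).filter (fun e => e > t) = s.drop n := by
    rw [List.filter_eq_self]
    intro a ha
    obtain ⟨i, hi, rfl⟩ := List.mem_iff_getElem.mp ha
    have hilen : n + i < s.length := by
      have := hi; simp [List.length_drop] at this; omega
    have : (s.drop n)[i] = s[n + i] := List.getElem_drop
    rw [this]
    simpa using hgt (n + i) hilen (by omega)
  rw [h1, h2, List.nil_append]

-- ===== VERDICT (by name: the statement is the Claim_ definition above) =====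
theorem count_and_sum_fuel_cells_spec : Claim_equal_count_and_sum_fuel_cells := by
  intro energy_lvl threshold _
  unfold Spec_count_and_sum_fuel_cells count_and_sum_fuel_cells count_and_sum_fuel_cells_alt
  set s := PySem.List.sorted energy_lvl (fun x => x) false with hsdef
  have hperm : s.Perm energy_lvl := PySem.List.sorted_perm energy_lvl (fun x => x) false
  have hpw : s.Pairwise (· ≤ ·) := by
    simpa using PySem.List.sorted_pairwise energy_lvl (fun x => x)
  obtain ⟨hr0, hrlen, hrle, hrgt⟩ :=
    pvBisect_spec s threshold hpw s.length 0 (s.length : Int)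
      le_rfl (by positivity) le_rfl (by simp) (by omega) (by intro i h hle; omega)
  set r := pvBisect s threshold s.length 0 (s.length : Int)
  have hslice : PySem.List.slice s (some r) none = s.drop r.toNat :=
    PySem.List.slice_from s hr0
  have hfd : s.filter (fun e => e > threshold) = s.drop r.toNat :=
    filter_eq_drop s threshold r.toNat hrle hrgt
  have hfperm : (energy_lvl.filter (fun e => e > threshold)).Perm
      (s.filter (fun e => e > threshold)) := (hperm.filter _).symm
  have key : PySem.List.slice s (some r) none = s.filter (fun e => e > threshold) := by
    rw [hslice, hfd]
  rw [fold_filter]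
  show _ = (((PySem.List.slice s (some r) none).length : Int),
    (PySem.List.slice s (some r) none).sum)
  rw [key]
  exact Prod.ext (by simp [hfperm.length_eq]) (by simpa using hfperm.sum_eq)
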